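-- pv_equiv track=rewrite | github.com/rany1024/screen_tool | screen_tool.py | get_wins_len_dict
-- ===== SOURCE A (Python) =====
-- def get_wins_len_dict(wins):
--     len_dict = {}
--
--     for win_name, p in wins.items():
--         for key, val in p.items():
--             current_len = len(val)
--             if key not in len_dict or len_dict[key] < current_len:
--                 len_dict[key] = current_len
--
--     #wins = copy.deepcopy(wins)
--     #
--     #for win_name, p in wins.items():
--     #    for key, val in p.items():
--     #        p[key] = val.ljust(len_dict[key])
--
--     return len_dict
-- ===== SOURCE B (Python) =====
-- def get_wins_len_dict(wins):
--     # key-major two-phase: first the distinct keys in first-occurrence order,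
--     # then for each key scan the windows that contain it for the max length
--     keys = list(dict.fromkeys(k for p in wins.values() for k in p))
--     return {k: max(len(p[k]) for p in wins.values() if k in p) for k in keys}
-- ===== Notes on version B (the rewrite author's own statement) =====
-- stated objective: alternative
-- what changed: B inverts the traversal: instead of A's single window-major pass keeping a running max per key in a dict, B first collects the distinct keys with dict.fromkeys, then builds the result key-major, re-scanning the windows containing each key for the max value-length.
import Mathlib
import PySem

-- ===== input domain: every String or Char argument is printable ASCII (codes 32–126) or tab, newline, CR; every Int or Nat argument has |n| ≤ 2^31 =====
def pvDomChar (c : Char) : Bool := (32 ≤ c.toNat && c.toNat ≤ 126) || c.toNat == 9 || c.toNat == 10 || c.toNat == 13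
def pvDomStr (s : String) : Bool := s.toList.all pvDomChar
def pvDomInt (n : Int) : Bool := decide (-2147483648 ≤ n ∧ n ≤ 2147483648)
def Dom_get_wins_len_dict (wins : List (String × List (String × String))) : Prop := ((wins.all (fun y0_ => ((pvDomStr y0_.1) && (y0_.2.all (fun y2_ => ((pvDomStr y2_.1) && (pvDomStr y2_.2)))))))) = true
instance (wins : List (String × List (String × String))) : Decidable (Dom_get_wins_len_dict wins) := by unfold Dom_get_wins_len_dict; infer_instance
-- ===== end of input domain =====

-- B inverts the traversal: keys are collected first, then each key does its own
-- scan over the windows containing it (key-major), instead of A's single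
-- window-major running-max dict pass. Alternative decomposition, same results.

-- ===== PORT A =====
-- literal transliteration of A: one dict accumulated over windows then pairs,
-- conditional overwrite "key not in len_dict or len_dict[key] < current_len"
def get_wins_len_dict (wins : List (String × List (String × String))) : List (String × Int) :=
  (wins.foldl (fun len_dict wp =>
      wp.2.foldl (fun d kv =>
          let current_len : Int := PySem.Str.len kv.2
          match d.get? kv.1 with
          | none => d.insert kv.1 current_len
          | some old => if old < current_len then d.insert kv.1 current_len else d)
        len_dict)
    (PySem.Dict.empty : PySem.Dict String Int)).items

-- ===== PORT B =====
-- Source B phase 1: keys = list(dict.fromkeys(k for p in wins.values() for k in p))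
-- Source B phase 2: {k: max(len(p[k]) for p in wins.values() if k in p) for k in keys};
-- the `| none => 0` branches are totality guards only — the filter guarantees the
-- key is found, and every key in `keys` occurs in some window
def get_wins_len_dict_alt (wins : List (String × List (String × String))) : List (String × Int) :=
  let keys : List String :=
    PySem.List.dedup ((wins.flatMap (fun wp => wp.2)).map (fun kv => kv.1))
  keys.map (fun k =>
    (k, match PySem.List.max?
          ((wins.filter (fun wp => wp.2.any (fun kv => kv.1 == k))).map
            (fun wp => match wp.2.find? (fun kv => kv.1 == k) with
              | some kv => (PySem.Str.len kv.2 : Int)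
              | none => 0))
          (fun x => x) with
        | some m => m
        | none => 0))

-- ===== PRECONDITION & SPEC =====
-- Pre_ excludes inner association lists with a duplicated key: such lists do not
-- represent any Python dict (dict keys are unique), so the corner is an artefact
-- of the list encoding (A's port folds over all duplicates, B's looks up the first).
def Pre_get_wins_len_dict (wins : List (String × List (String × String))) : Prop :=
  ∀ wp ∈ wins, (wp.2.map Prod.fst).Nodup
instance (wins : List (String × List (String × String))) : Decidable (Pre_get_wins_len_dict wins) := by unfold Pre_get_wins_len_dict; infer_instance

def pvWitness_get_wins_len_dict : (List (String × List (String × String))) :=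
  [("w1", [("name", "ab"), ("id", "7")]), ("w2", [("name", "xyzz")])]

def Spec_get_wins_len_dict (wins : List (String × List (String × String))) (out : List (String × Int)) : Prop := out = get_wins_len_dict_alt wins
instance (wins : List (String × List (String × String))) (out : List (String × Int)) : Decidable (Spec_get_wins_len_dict wins out) := by unfold Spec_get_wins_len_dict; infer_instance

-- ===== CLAIM (what is proved, stated in full; the proofs are below) =====
def Claim_equal_get_wins_len_dict : Prop := ∀ (wins : List (String × List (String × String))), Dom_get_wins_len_dict wins → Pre_get_wins_len_dict wins → Spec_get_wins_len_dict wins (get_wins_len_dict wins)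

-- ===== LEMMAS AND PROOFS =====

def pvStep (d : PySem.Dict String Int) (kv : String × String) : PySem.Dict String Int :=
  let current_len : Int := PySem.Str.len kv.2
  match d.get? kv.1 with
  | none => d.insert kv.1 current_len
  | some old => if old < current_len then d.insert kv.1 current_len else d

def pvListMax : List Int → Int
  | [] => 0
  | x :: t => t.foldl max x

def pvM (S : List (String × String)) (k : String) : Int :=
  pvListMax ((S.filter (fun q => q.1 == k)).map (fun q => (PySem.Str.len q.2 : Int)))

lemma pvListMax_append (l : List Int) (x : Int) :
    pvListMax (l ++ [x]) = match l with | [] => x | _ :: _ => max (pvListMax l) x := by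
  cases l <;> simp [pvListMax, List.foldl_append]

lemma pvM_append_ne (S : List (String × String)) (k k' : String) (v : String) (h : k' ≠ k) :
    pvM (S ++ [(k, v)]) k' = pvM S k' := by
  simp [pvM, List.filter_append, beq_iff_eq, Ne.symm h]

lemma pv_filter_nil_of_not_mem (S : List (String × String)) (k : String)
    (h : k ∉ S.map Prod.fst) : S.filter (fun q => q.1 == k) = [] := by
  rw [List.filter_eq_nil_iff]
  intro q hq hqk
  exact h (List.mem_map.mpr ⟨q, hq, beq_iff_eq.mp hqk⟩)

lemma pvM_append_new (S : List (String × String)) (k v : String) (h : k ∉ S.map Prod.fst) :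
    pvM (S ++ [(k, v)]) k = (PySem.Str.len v : Int) := by
  simp [pvM, List.filter_append, pv_filter_nil_of_not_mem S k h, pvListMax]

lemma pvM_append_old (S : List (String × String)) (k v : String) (h : k ∈ S.map Prod.fst) :
    pvM (S ++ [(k, v)]) k = max (pvM S k) (PySem.Str.len v : Int) := by
  have hne : S.filter (fun q => q.1 == k) ≠ [] := by
    obtain ⟨q, hq, hqk⟩ := List.mem_map.mp h
    intro hnil
    have : q ∈ S.filter (fun q => q.1 == k) := List.mem_filter.mpr ⟨hq, beq_iff_eq.mpr hqk⟩
    simp [hnil] at this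
  rw [pvM, List.filter_append, List.map_append]
  simp only [List.filter_cons, beq_self_eq_true, if_pos, List.filter_nil,
    List.map_cons, List.map_nil]
  rw [pvListMax_append]
  cases hcase : S.filter (fun q => q.1 == k) with
  | nil => exact absurd hcase hne
  | cons a t => simp [pvM, hcase]

lemma pv_foldA_items (S : List (String × String)) :
    (S.foldl pvStep PySem.Dict.empty).items
      = (PySem.Set.ofList (S.map Prod.fst)).map (fun k => (k, pvM S k)) := by
  induction S using List.reverseRecOn with
  | nil => simp [PySem.Set.ofList, PySem.Dict.empty]
  | append_singleton S kv ih =>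
    obtain ⟨k, v⟩ := kv
    rw [List.foldl_append, List.foldl_cons, List.foldl_nil]
    set D := S.foldl pvStep PySem.Dict.empty with hD
    set K := PySem.Set.ofList (S.map Prod.fst) with hK
    have hkeys : D.keys = K := by
      have h0 : D.keys = D.items.map Prod.fst := rfl
      rw [h0, ih, List.map_map]
      simp [Function.comp_def]
    have hnd : D.keys.Nodup := by rw [hkeys]; exact PySem.Set.nodup_ofList _
    have hmapfst : (S ++ [(k, v)]).map Prod.fst = S.map Prod.fst ++ [k] := by simp
    by_cases hk : k ∈ K
    · have hget : D.get? k = some (pvM S k) := by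
        refine PySem.Dict.get?_of_mem_items D ?_ hnd
        rw [ih]; exact List.mem_map.mpr ⟨k, hk, rfl⟩
      have hcont : D.contains k = true := by
        rw [PySem.Dict.contains_iff_mem_keys D k, hkeys]; exact hk
      have hadd : PySem.Set.ofList ((S ++ [(k, v)]).map Prod.fst) = K := by
        rw [hmapfst, PySem.Set.ofList_append_singleton, hK]
        exact PySem.Set.add_of_mem hk
      rw [hadd]
      simp only [pvStep, hget]
      by_cases hlt : pvM S k < (PySem.Str.len v : Int)
      · rw [if_pos hlt, PySem.Dict.items_insert_of_contains D _ hcont, ih, List.map_map]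
        apply List.map_congr_left
        intro k' hk'
        by_cases hkk : k' = k
        · subst hkk
          have hmem : k' ∈ S.map Prod.fst := by rwa [← PySem.Set.mem_ofList, ← hK]
          simp only [Function.comp_apply, beq_self_eq_true, if_pos]
          rw [pvM_append_old S k' v hmem, max_eq_right (le_of_lt hlt)]
        · have hbf : (k' == k) = false := beq_false_of_ne hkk
          simp only [Function.comp_apply, hbf, Bool.false_eq_true, if_false,
            pvM_append_ne S k k' v hkk]
      · rw [if_neg hlt, ih]
        apply List.map_congr_left
        intro k' hk'
        by_cases hkk : k' = k
        · subst hkk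
          have hmem : k' ∈ S.map Prod.fst := by rwa [← PySem.Set.mem_ofList, ← hK]
          rw [pvM_append_old S k' v hmem, max_eq_left (not_lt.mp hlt)]
        · rw [pvM_append_ne S k k' v hkk]
    · have hget : D.get? k = none := by
        rw [PySem.Dict.get?_eq_none_iff_not_mem_keys D k, hkeys]; exact hk
      have hcont : D.contains k = false := by
        rw [Bool.eq_false_iff]
        intro hc
        exact hk (hkeys ▸ (PySem.Dict.contains_iff_mem_keys D k).mp hc)
      have hknotin : k ∉ S.map Prod.fst := by rwa [← PySem.Set.mem_ofList, ← hK]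
      have hadd : PySem.Set.ofList ((S ++ [(k, v)]).map Prod.fst) = K ++ [k] := by
        rw [hmapfst, PySem.Set.ofList_append_singleton, hK]
        exact PySem.Set.add_of_not_mem hk
      rw [hadd]
      simp only [pvStep, hget]
      rw [PySem.Dict.items_insert_of_not_contains D _ hcont, ih, List.map_append]
      congr 1
      · apply List.map_congr_left
        intro k' hk'
        have hkk : k' ≠ k := fun h => hk (h ▸ hk')
        rw [pvM_append_ne S k k' v hkk]
      · simp [pvM_append_new S k v hknotin]

-- within one duplicate-free window, the pairs with key k are exactly the first match
lemma pv_filter_one_window (l : List (String × String)) (k : String)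
    (hnd : (l.map Prod.fst).Nodup) :
    l.filter (fun q => q.1 == k)
      = match l.find? (fun q => q.1 == k) with | some kv => [kv] | none => [] := by
  induction l with
  | nil => simp
  | cons a t ih =>
    simp only [List.map_cons, List.nodup_cons] at hnd
    by_cases hak : a.1 = k
    · have hb : (a.1 == k) = true := beq_iff_eq.mpr hak
      rw [List.filter_cons, List.find?_cons]
      simp only [hb, if_pos]
      have : t.filter (fun q => q.1 == k) = [] := by
        apply pv_filter_nil_of_not_mem
        rw [← hak]; exact hnd.1
      simp [this]
    · have hb : (a.1 == k) = false := beq_false_of_ne hak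
      rw [List.filter_cons, List.find?_cons]
      simp only [hb, Bool.false_eq_true, if_false]
      exact ih hnd.2

-- the flattened filtered pairs, mapped to lengths, equal B's per-key scan list
lemma pv_perkey_eq (wins : List (String × List (String × String))) (k : String)
    (hpre : ∀ wp ∈ wins, (wp.2.map Prod.fst).Nodup) :
    (((wins.flatMap (fun wp => wp.2)).filter (fun q => q.1 == k)).map
        (fun q => (PySem.Str.len q.2 : Int)))
      = (wins.filter (fun wp => wp.2.any (fun kv => kv.1 == k))).map
          (fun wp => match wp.2.find? (fun kv => kv.1 == k) with
            | some kv => (PySem.Str.len kv.2 : Int)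
            | none => 0) := by
  induction wins with
  | nil => simp
  | cons w t ih =>
    have hw := hpre w (List.mem_cons_self ..)
    have ht : ∀ wp ∈ t, (wp.2.map Prod.fst).Nodup := fun wp h => hpre wp (List.mem_cons_of_mem _ h)
    rw [List.flatMap_cons, List.filter_append, List.map_append, List.filter_cons, ih ht]
    rw [pv_filter_one_window w.2 k hw]
    cases hf : w.2.find? (fun q => q.1 == k) with
    | none =>
      have hany : w.2.any (fun kv => kv.1 == k) = false := by
        simp only [List.any_eq_false]
        exact fun x hx => by simpa using List.find?_eq_none.mp hf x hx
      simp [hany]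
    | some kv =>
      have hany : w.2.any (fun kv => kv.1 == k) = true := by
        rw [List.any_eq_true]
        have hp : (kv.1 == k) = true := List.find?_some (p := fun q : String × String => q.1 == k) hf
        exact ⟨kv, List.mem_of_find?_eq_some hf, hp⟩
      simp [hany, hf]

-- ===== VERDICT (by name: the statement is the Claim_ definition above) =====
theorem get_wins_len_dict_spec : Claim_equal_get_wins_len_dict := by
  intro wins _hdom hpre
  show get_wins_len_dict wins = get_wins_len_dict_alt wins
  have hA : get_wins_len_dict wins
      = ((wins.flatMap (fun wp => wp.2)).foldl pvStep PySem.Dict.empty).items := by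
    show (wins.foldl (fun len_dict wp => wp.2.foldl pvStep len_dict)
        (PySem.Dict.empty : PySem.Dict String Int)).items = _
    rw [List.foldl_flatMap]
  rw [hA, pv_foldA_items]
  show _ = (PySem.List.dedup ((wins.flatMap (fun wp => wp.2)).map (fun kv => kv.1))).map _
  rw [PySem.List.dedup_eq_ofList]
  apply List.map_congr_left
  intro k hk
  have hk' : k ∈ (wins.flatMap (fun wp => wp.2)).map Prod.fst :=
    (PySem.Set.mem_ofList _ _).mp hk
  have hne : (wins.flatMap (fun wp => wp.2)).filter (fun q => q.1 == k) ≠ [] := by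
    obtain ⟨q, hq, hqk⟩ := List.mem_map.mp hk'
    intro hnil
    have : q ∈ (wins.flatMap (fun wp => wp.2)).filter (fun q => q.1 == k) :=
      List.mem_filter.mpr ⟨hq, beq_iff_eq.mpr hqk⟩
    simp [hnil] at this
  rw [← pv_perkey_eq wins k hpre, pvM]
  cases hcase : (wins.flatMap (fun wp => wp.2)).filter (fun q => q.1 == k) with
  | nil => exact absurd hcase hne
  | cons a t =>
    rw [List.map_cons, PySem.List.max?_id_cons]
    rfl
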